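-- pv_equiv track=rewrite | github.com/pwang867/LeetCode-Solutions-Python | 1170. Compare Strings by Frequency of the Smallest Character.py | f
-- ===== SOURCE A (Python) =====
-- def f(word):
--     """ this function find the frequency of the smallest character """
--     if not word:
--         return 0
--     d = {}
--     for c in word:
--         d[c] = d.get(c, 0) + 1
--     N = ord("a")
--     for i in range(26):
--         c = chr(i + N)
--         if c in d:
--             return d[c]
-- ===== SOURCE B (Python) =====
-- def f(word):
--     """frequency of the smallest character: keep only lowercase letters,
--     take their minimum directly and count it (no histogram, no a-z scan)"""
--     if not word:
--         return 0
--     letters = [c for c in word if 'a' <= c <= 'z']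
--     m = min(letters)
--     return letters.count(m)
-- ===== Notes on version B (the rewrite author's own statement) =====
-- stated objective: simpler
-- what changed: B drops A's character histogram and ordered 26-letter alphabet scan; it filters the lowercase letters, takes their minimum with min() and counts it with list.count.
-- outside the precondition, e.g. on f('AB!'): A returns None, B raises ValueError
import Mathlib
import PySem

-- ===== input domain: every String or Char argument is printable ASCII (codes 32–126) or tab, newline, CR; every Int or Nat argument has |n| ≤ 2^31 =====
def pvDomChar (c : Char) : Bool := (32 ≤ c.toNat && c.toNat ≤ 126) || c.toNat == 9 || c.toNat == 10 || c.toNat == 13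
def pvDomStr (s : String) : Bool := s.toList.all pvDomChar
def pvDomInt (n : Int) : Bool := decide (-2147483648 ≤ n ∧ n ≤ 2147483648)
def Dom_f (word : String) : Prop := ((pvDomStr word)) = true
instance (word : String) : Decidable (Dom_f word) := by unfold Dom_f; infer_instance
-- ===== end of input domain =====

-- B replaces A's histogram + ordered a-z scan by "filter lowercase, min, count" (objective: simpler).

-- ===== PORT A =====
-- the 'for i in range(26): if c in d: return d[c]' loop; falling off the end is
-- Python's implicit 'return None' (no Int value) — those inputs are excluded by Pre_f, the 0 is unreachable there
def fScanA (d : PySem.Dict Char Int) : List Nat → Int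
  | [] => 0
  | i :: rest =>
      let c := Char.ofNat (i + 97)
      if d.contains c then d.getD c 0 else fScanA d rest

def f (word : String) : Int :=
  if word.toList.isEmpty then 0
  else
    let d := word.toList.foldl (fun d c => d.insert c (d.getD c 0 + 1)) PySem.Dict.empty
    fScanA d (List.range 26)

-- ===== PORT B =====
def f_alt (word : String) : Int :=
  if word.toList.isEmpty then 0
  else
    let letters := word.toList.filter (fun c => decide ('a' ≤ c) && decide (c ≤ 'z'))
    match PySem.List.min? letters (fun c => c) with
    | some m => (PySem.List.count letters m : Int)
    | none => 0  -- Python's min raises ValueError here; excluded by Pre_f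

-- ===== PRECONDITION & SPEC =====
-- Pre_f excludes nonempty words containing no lowercase letter a-z: there A's alphabet scan falls
-- off and Python returns None (not an int), while B's min() raises ValueError.
def Pre_f (word : String) : Prop :=
  word.toList = [] ∨ (word.toList.any (fun c => decide ('a' ≤ c) && decide (c ≤ 'z'))) = true
instance (word : String) : Decidable (Pre_f word) := by unfold Pre_f; infer_instance
def pvWitness_f : String := "ab"

def Spec_f (word : String) (out : Int) : Prop := out = f_alt word
instance (word : String) (out : Int) : Decidable (Spec_f word out) := by unfold Spec_f; infer_instance

-- ===== CLAIM (what is proved, stated in full; the proofs are below) =====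
def Claim_equal_f : Prop := ∀ (word : String), Dom_f word → Pre_f word → Spec_f word (f word)

-- ===== LEMMAS AND PROOFS =====

lemma charToNat_ofNat_small (n : Nat) (h : n < 1000) : (Char.ofNat n).toNat = n := by
  rw [Char.toNat_ofNat, if_pos (Or.inl (by omega))]

lemma char_le_iff (a b : Char) : a ≤ b ↔ a.toNat ≤ b.toNat := by
  rw [Char.le_def]
  show a.val ≤ b.val ↔ a.val.toNat ≤ b.val.toNat
  exact UInt32.le_iff_toNat_le

-- the a-z scan returns the count of the first letter present, i.e. of target index t
lemma fScanA_range' (d : PySem.Dict Char Int) (t : Nat)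
    (h2 : d.contains (Char.ofNat (t + 97)) = true)
    (h1 : ∀ j, j < t → d.contains (Char.ofNat (j + 97)) = false) :
    ∀ n a, a ≤ t → t < a + n → fScanA d (List.range' a n) = d.getD (Char.ofNat (t + 97)) 0 := by
  intro n
  induction n with
  | zero => intro a h3 h4; omega
  | succ k ih =>
      intro a h3 h4
      rw [List.range'_succ]
      by_cases hat : a = t
      · subst hat; simp [fScanA, h2]
      · have hlt : a < t := by omega
        rw [show fScanA d (a :: List.range' (a + 1) k) =
              if d.contains (Char.ofNat (a + 97)) then d.getD (Char.ofNat (a + 97)) 0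
              else fScanA d (List.range' (a + 1) k) from rfl,
            h1 a hlt]
        simpa using ih (a + 1) (by omega) (by omega)

theorem f_spec : Claim_equal_f := by
  intro word _ hpre
  unfold Spec_f f f_alt
  by_cases hempty : word.toList.isEmpty
  · rw [if_pos hempty, if_pos hempty]
  · rw [if_neg hempty, if_neg hempty]
    have hne : word.toList ≠ [] := by simpa [List.isEmpty_iff] using hempty
    rcases hpre with h | h
    · exact absurd h hne
    obtain ⟨c0, hc0mem, hc0⟩ := List.any_eq_true.mp h
    obtain ⟨hc0lo', hc0hi'⟩ := (Bool.and_eq_true _ _).mp hc0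
    have hc0lo : ('a' : Char) ≤ c0 := of_decide_eq_true hc0lo'
    have hc0hi : c0 ≤ ('z' : Char) := of_decide_eq_true hc0hi'
    set L := word.toList with hL
    set p : Char → Bool := fun c => decide ('a' ≤ c) && decide (c ≤ 'z') with hp
    set letters := L.filter p with hletters
    have hc0f : c0 ∈ letters := List.mem_filter.mpr ⟨hc0mem, by simp [hp, hc0lo, hc0hi]⟩
    have hlne : letters ≠ [] := fun h => by simp [h] at hc0f
    obtain ⟨m, hm⟩ : ∃ m, PySem.List.min? letters (fun c => c) = some m := by
      cases hmin : PySem.List.min? letters (fun c => c) with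
      | none => exact absurd ((PySem.List.min?_eq_none_iff letters _).mp hmin) hlne
      | some m => exact ⟨m, rfl⟩
    have hmmem : m ∈ letters := PySem.List.min?_mem hm
    have hmmin : ∀ y ∈ letters, m ≤ y := PySem.List.min?_isMin hm
    obtain ⟨hmL, hmp⟩ := List.mem_filter.mp hmmem
    have hmlo : ('a' : Char) ≤ m := by simp [hp] at hmp; exact hmp.1
    have hmhi : m ≤ ('z' : Char) := by simp [hp] at hmp; exact hmp.2
    have hmlo' : 97 ≤ m.toNat := (char_le_iff _ _).mp hmlo
    have hmhi' : m.toNat ≤ 122 := (char_le_iff _ _).mp hmhi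
    -- identify the dict with counter L
    rw [PySem.Dict.foldl_insert_getD_add_one_eq_counter]
    set t : Nat := m.toNat - 97 with ht
    have hchar : Char.ofNat (t + 97) = m := by
      have : t + 97 = m.toNat := by omega
      rw [this, Char.ofNat_toNat]
    have h2 : (PySem.Dict.counter L).contains (Char.ofNat (t + 97)) = true := by
      rw [hchar, PySem.Dict.contains_counter]
      exact List.contains_iff_mem.mpr hmL
    have h1 : ∀ j, j < t → (PySem.Dict.counter L).contains (Char.ofNat (j + 97)) = false := by
      intro j hj
      rw [PySem.Dict.contains_counter]
      by_contra hcon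
      have hmem : Char.ofNat (j + 97) ∈ L :=
        List.contains_iff_mem.mp (by revert hcon; cases L.contains (Char.ofNat (j + 97)) <;> simp)
      have hto : (Char.ofNat (j + 97)).toNat = j + 97 := charToNat_ofNat_small _ (by omega)
      have hmemf : Char.ofNat (j + 97) ∈ letters := by
        refine List.mem_filter.mpr ⟨hmem, ?_⟩
        have ha : ('a' : Char).toNat = 97 := rfl
        have hz : ('z' : Char).toNat = 122 := rfl
        simp only [hp, Bool.and_eq_true, decide_eq_true_eq]
        exact ⟨(char_le_iff _ _).mpr (by rw [hto, ha]; omega),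
               (char_le_iff _ _).mpr (by rw [hto, hz]; omega)⟩
      have := (char_le_iff _ _).mp (hmmin _ hmemf)
      rw [hto] at this
      omega
    rw [List.range_eq_range', fScanA_range' _ t h2 h1 26 0 (by omega) (by omega), hchar]
    have hcnt : PySem.List.count letters m = List.count m L := by
      rw [PySem.List.count_eq, hletters, List.count_filter (by simp [hp, hmlo, hmhi])]
    simp only [hm, PySem.Dict.getD_counter, hcnt]
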